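-- pv_equiv track=rewrite | github.com/vidagy/aoc | aoc/year_2024/task_12.py | count_in_a_row
-- ===== SOURCE A (Python) =====
-- from typing import Generator, Iterable, Optional
--
-- def count_intervals(nums: set[int]) -> int:
--     sorted_nums = list(nums)
--     sorted_nums.sort()
--     if len(sorted_nums) < 1:
--         return 0
--
--     res = 1
--     pre = sorted_nums[0]
--     for num in sorted_nums[1:]:
--         if pre + 1 != num:
--             res += 1
--         pre = num
--     return res
--
-- def count_in_a_row(
--     index: int,
--     dir: list[int],
--     rows: Iterable[set[tuple[int, int]]],
--     cluster: set[tuple[int, int]],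
-- ):
--     res = 0
--     for row in rows:
--         nums = set()
--         for n in row:
--             c = (dir[0] + n[0], dir[1] + n[1])
--             if c in cluster:
--                 nums.add(c[1 - index])
--         res += count_intervals(nums)
--     return res
-- ===== SOURCE B (Python) =====
-- def count_in_a_row(index, dir, rows, cluster):
--     total = 0
--     for row in rows:
--         nums = {(dir[0] + n[0], dir[1] + n[1])[1 - index]
--                 for n in row if (dir[0] + n[0], dir[1] + n[1]) in cluster}
--         total += sum(v - 1 not in nums for v in nums)
--     return total
-- ===== Notes on version B (the rewrite author's own statement) =====
-- stated objective: simpler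
-- what changed: Replaces count_intervals' sort-then-adjacent-gap scan with a direct membership count of interval starts (values v with v-1 not in the set) over the per-row set, so the helper and the sorting disappear.
import Mathlib
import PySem

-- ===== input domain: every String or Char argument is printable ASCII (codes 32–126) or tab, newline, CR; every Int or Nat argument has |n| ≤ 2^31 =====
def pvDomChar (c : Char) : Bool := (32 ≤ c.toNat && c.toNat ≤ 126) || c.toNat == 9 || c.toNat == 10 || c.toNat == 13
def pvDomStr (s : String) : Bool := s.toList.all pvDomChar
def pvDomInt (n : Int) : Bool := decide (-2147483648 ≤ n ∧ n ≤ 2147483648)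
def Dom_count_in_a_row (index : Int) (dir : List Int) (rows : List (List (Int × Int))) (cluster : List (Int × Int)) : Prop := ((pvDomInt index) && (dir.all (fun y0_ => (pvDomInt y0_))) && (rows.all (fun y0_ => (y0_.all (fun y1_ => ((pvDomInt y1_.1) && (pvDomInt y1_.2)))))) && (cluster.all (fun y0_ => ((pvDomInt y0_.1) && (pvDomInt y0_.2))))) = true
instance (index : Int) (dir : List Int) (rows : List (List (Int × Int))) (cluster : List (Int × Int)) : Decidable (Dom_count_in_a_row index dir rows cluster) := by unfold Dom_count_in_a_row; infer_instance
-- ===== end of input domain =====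

-- B replaces the sort-and-gap helper by a direct membership count of interval
-- starts over the same per-row set (simpler; return value only).

-- ===== PORT A =====
-- loop body of count_intervals: state (res, pre)
def ciStep (st : Int × Int) (num : Int) : Int × Int :=
  (if st.2 + 1 ≠ num then st.1 + 1 else st.1, num)

def count_intervals (nums : List Int) : Int :=
  let sorted_nums := PySem.List.sorted nums (fun x => x) false
  if sorted_nums.length < 1 then 0
  else
    let pre := PySem.List.pyGetD sorted_nums 0 0
    ((PySem.List.slice sorted_nums (some 1) none).foldl ciStep (1, pre)).1

def count_in_a_row (index : Int) (dir : List Int) (rows : List (List (Int × Int))) (cluster : List (Int × Int)) : Int :=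
  rows.foldl (fun res row =>
    let nums := row.foldl (fun (nums : PySem.Set Int) n =>
      let c := (PySem.List.pyGetD dir 0 0 + n.1, PySem.List.pyGetD dir 1 0 + n.2)
      if c ∈ cluster then
        PySem.Set.add nums (PySem.List.pyGetD [c.1, c.2] (1 - index) 0)
      else nums) PySem.Set.empty
    res + count_intervals nums) 0

-- ===== PORT B =====
def count_in_a_row_alt (index : Int) (dir : List Int) (rows : List (List (Int × Int))) (cluster : List (Int × Int)) : Int :=
  rows.foldl (fun total row =>
    let nums := PySem.Set.ofList (row.filterMap (fun n =>
      let c := (PySem.List.pyGetD dir 0 0 + n.1, PySem.List.pyGetD dir 1 0 + n.2)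
      if c ∈ cluster then some (PySem.List.pyGetD [c.1, c.2] (1 - index) 0) else none))
    total + (nums.map (fun v => if v - 1 ∈ nums then (0 : Int) else 1)).sum) 0

-- ===== PRECONDITION & SPEC =====
-- Pre_ excludes exactly the inputs where Python A raises: IndexError on dir[0]/dir[1]
-- (dir shorter than 2 while some row is nonempty) or on the tuple access c[1-index]
-- (index outside 0..3 while some shifted cell of that row lies in cluster).
def Pre_count_in_a_row (index : Int) (dir : List Int) (rows : List (List (Int × Int))) (cluster : List (Int × Int)) : Prop :=
  ∀ row ∈ rows, row = [] ∨ (2 ≤ dir.length ∧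
    ((0 ≤ index ∧ index ≤ 3) ∨
      ∀ n ∈ row, (dir.getD 0 0 + n.1, dir.getD 1 0 + n.2) ∉ cluster))
instance (index : Int) (dir : List Int) (rows : List (List (Int × Int))) (cluster : List (Int × Int)) : Decidable (Pre_count_in_a_row index dir rows cluster) := by unfold Pre_count_in_a_row; infer_instance

def pvWitness_count_in_a_row : Int × List Int × (List (List (Int × Int))) × (List (Int × Int)) :=
  (0, [1, 0], [[(0, 0), (2, 0)], [(5, 5)]], [(1, 0), (3, 0), (2, 5)])

def Spec_count_in_a_row (index : Int) (dir : List Int) (rows : List (List (Int × Int))) (cluster : List (Int × Int)) (out : Int) : Prop := out = count_in_a_row_alt index dir rows cluster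
instance (index : Int) (dir : List Int) (rows : List (List (Int × Int))) (cluster : List (Int × Int)) (out : Int) : Decidable (Spec_count_in_a_row index dir rows cluster out) := by unfold Spec_count_in_a_row; infer_instance

-- ===== CLAIM (what is proved, stated in full; the proofs are below) =====
def Claim_equal_count_in_a_row : Prop := ∀ (index : Int) (dir : List Int) (rows : List (List (Int × Int))) (cluster : List (Int × Int)), Dom_count_in_a_row index dir rows cluster → Pre_count_in_a_row index dir rows cluster → Spec_count_in_a_row index dir rows cluster (count_in_a_row index dir rows cluster)

-- ===== LEMMAS AND PROOFS =====

-- B's per-row count, parametrised by the membership set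
def cnt (L S : List Int) : Int := (L.map (fun v => if v - 1 ∈ S then (0 : Int) else 1)).sum

lemma fold_shift : ∀ (t : List Int) (b k : Int),
    (t.foldl ciStep (k, b)).1 = k - 1 + (t.foldl ciStep (1, b)).1 := by
  intro t
  induction t with
  | nil => intro b k; simp
  | cons c t ih =>
    intro b k
    simp only [List.foldl_cons, ciStep]
    split_ifs with hc
    · rw [ih c (k + 1), ih c (1 + 1)]; ring
    · rw [ih c k]

lemma main_sorted : ∀ (t : List Int) (h : Int), (h :: t).Pairwise (· < ·) →
    (t.foldl ciStep (1, h)).1 = cnt (h :: t) (h :: t) := by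
  intro t
  induction t with
  | nil =>
    intro h _
    simp [cnt]
  | cons b t ih =>
    intro h hp
    have hhb : h < b := (List.pairwise_cons.1 hp).1 b (by simp)
    have hht : ∀ v ∈ t, h < v := fun v hv => (List.pairwise_cons.1 hp).1 v (by simp [hv])
    have hp2 : (b :: t).Pairwise (· < ·) := (List.pairwise_cons.1 hp).2
    have hbt : ∀ v ∈ t, b < v := fun v hv => (List.pairwise_cons.1 hp2).1 v hv
    have hstep : ∀ v ∈ t, ((if v - 1 ∈ h :: b :: t then (0 : Int) else 1)
        = (if v - 1 ∈ b :: t then (0 : Int) else 1)) := by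
      intro v hv
      have h1 : v - 1 = h ↔ False := by
        constructor
        · intro he
          have := hbt v hv
          omega
        · exact False.elim
      simp [List.mem_cons, h1]
    have hsum : (t.map (fun v => if v - 1 ∈ h :: b :: t then (0 : Int) else 1)).sum
        = (t.map (fun v => if v - 1 ∈ b :: t then (0 : Int) else 1)).sum := by
      rw [List.map_congr_left hstep]
    have hhm : (h - 1 ∈ h :: b :: t) ↔ False := by
      constructor
      · intro hm
        rcases List.mem_cons.1 hm with h1 | hm
        · omega
        · rcases List.mem_cons.1 hm with h1 | hm
          · omega
          · have := hht _ hm; omega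
      · exact False.elim
    have hbm : (b - 1 ∈ b :: t) ↔ False := by
      constructor
      · intro hm
        rcases List.mem_cons.1 hm with h1 | hm
        · omega
        · have := hbt _ hm; omega
      · exact False.elim
    have hbm2 : (b - 1 ∈ h :: b :: t) ↔ b - 1 = h := by
      constructor
      · intro hm
        rcases List.mem_cons.1 hm with h1 | hm
        · exact h1
        · exact absurd hm (by rw [hbm]; exact not_false)
      · intro he; exact List.mem_cons.2 (Or.inl he)
    have lhs : ((b :: t).foldl ciStep (1, h)).1
        = (if h + 1 ≠ b then (2 : Int) else 1) - 1 + cnt (b :: t) (b :: t) := by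
      simp only [List.foldl_cons, ciStep]
      split_ifs with hc
      · rw [fold_shift t b (1 + 1), ih b hp2]; ring
      · rw [ih b hp2]; ring
    rw [lhs]
    simp only [cnt, List.map_cons, List.sum_cons] at *
    rw [hsum]
    rw [if_congr hhm rfl rfl, if_congr hbm rfl rfl, if_congr hbm2 rfl rfl]
    split_ifs <;> omega

lemma count_intervals_eq_cnt (xs : List Int) :
    count_intervals (PySem.Set.ofList xs) = cnt (PySem.Set.ofList xs) (PySem.Set.ofList xs) := by
  set s := PySem.Set.ofList xs with hs
  have hperm : (PySem.List.sorted s (fun x => x) false).Perm s := PySem.List.sorted_perm s (fun x => x) false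
  have hlt : (PySem.List.sorted s (fun x => x) false).Pairwise (· < ·) := by
    rw [hs]; exact PySem.List.sorted_ofList_pairwise_lt xs
  unfold count_intervals
  cases hsrt : PySem.List.sorted s (fun x => x) false with
  | nil =>
    have hnil : s = [] := (PySem.List.sorted_eq_nil_iff s (fun x => x) false).1 hsrt
    simp [hnil, cnt]
  | cons h t =>
    rw [hsrt] at hperm hlt
    have hcnt : cnt (h :: t) (h :: t) = cnt s s := by
      unfold cnt
      have hmemf : ∀ v ∈ (h :: t), ((if v - 1 ∈ h :: t then (0 : Int) else 1)
          = (if v - 1 ∈ s then (0 : Int) else 1)) := by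
        intro v _
        rw [if_congr hperm.mem_iff rfl rfl]
      rw [List.map_congr_left hmemf]
      exact (hperm.map _).sum_eq
    simp only [hsrt]
    rw [PySem.List.slice_from_one, PySem.List.pyGetD_zero_cons]
    simp only [List.length_cons, List.tail_cons]
    rw [if_neg (by omega)]
    rw [main_sorted t h hlt, hcnt]

lemma build_eq {α : Type} (row : List α) (p : α → Prop) [DecidablePred p] (g : α → Int) :
    ∀ (s : PySem.Set Int),
    row.foldl (fun s n => if p n then PySem.Set.add s (g n) else s) s
      = PySem.Set.update s (row.filterMap (fun n => if p n then some (g n) else none)) := by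
  induction row with
  | nil => intro s; simp [PySem.Set.update]
  | cons a row ih =>
    intro s
    simp only [List.foldl_cons, List.filterMap_cons]
    split_ifs with ha
    · rw [ih, PySem.Set.update_cons]
    · rw [ih]

lemma row_eq (index : Int) (dir : List Int) (cluster : List (Int × Int)) (row : List (Int × Int)) :
    count_intervals (row.foldl (fun (nums : PySem.Set Int) n =>
        let c := (PySem.List.pyGetD dir 0 0 + n.1, PySem.List.pyGetD dir 1 0 + n.2)
        if c ∈ cluster then
          PySem.Set.add nums (PySem.List.pyGetD [c.1, c.2] (1 - index) 0)
        else nums) PySem.Set.empty)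
      = cnt (PySem.Set.ofList (row.filterMap (fun n =>
          let c := (PySem.List.pyGetD dir 0 0 + n.1, PySem.List.pyGetD dir 1 0 + n.2)
          if c ∈ cluster then some (PySem.List.pyGetD [c.1, c.2] (1 - index) 0) else none)))
        (PySem.Set.ofList (row.filterMap (fun n =>
          let c := (PySem.List.pyGetD dir 0 0 + n.1, PySem.List.pyGetD dir 1 0 + n.2)
          if c ∈ cluster then some (PySem.List.pyGetD [c.1, c.2] (1 - index) 0) else none))) := by
    have hb := build_eq row
      (fun n => (PySem.List.pyGetD dir 0 0 + n.1, PySem.List.pyGetD dir 1 0 + n.2) ∈ cluster)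
      (fun n => PySem.List.pyGetD [PySem.List.pyGetD dir 0 0 + n.1, PySem.List.pyGetD dir 1 0 + n.2] (1 - index) 0)
      PySem.Set.empty
    simp only at hb ⊢
    rw [hb, show (PySem.Set.empty : PySem.Set Int) = [] from rfl, PySem.Set.update_nil_left]
    exact count_intervals_eq_cnt _

-- ===== VERDICT (by name: the statement is the Claim_ definition above) =====
theorem count_in_a_row_spec : Claim_equal_count_in_a_row := by
  intro index dir rows cluster _ _
  unfold Spec_count_in_a_row count_in_a_row count_in_a_row_alt
  suffices h : ∀ (rs : List (List (Int × Int))) (a : Int),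
      rs.foldl (fun res row =>
        let nums := row.foldl (fun (nums : PySem.Set Int) n =>
          let c := (PySem.List.pyGetD dir 0 0 + n.1, PySem.List.pyGetD dir 1 0 + n.2)
          if c ∈ cluster then
            PySem.Set.add nums (PySem.List.pyGetD [c.1, c.2] (1 - index) 0)
          else nums) PySem.Set.empty
        res + count_intervals nums) a
      = rs.foldl (fun total row =>
        let nums := PySem.Set.ofList (row.filterMap (fun n =>
          let c := (PySem.List.pyGetD dir 0 0 + n.1, PySem.List.pyGetD dir 1 0 + n.2)
          if c ∈ cluster then some (PySem.List.pyGetD [c.1, c.2] (1 - index) 0) else none))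
        total + (nums.map (fun v => if v - 1 ∈ nums then (0 : Int) else 1)).sum) a by
    exact h rows 0
  intro rs
  induction rs with
  | nil => intro a; rfl
  | cons row rs ih =>
    intro a
    simp only [List.foldl_cons]
    rw [ih]
    congr 1
    show a + count_intervals _ = a + cnt _ _
    exact congrArg (a + ·) (row_eq index dir cluster row)
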